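-- pv_equiv track=rewrite | github.com/swativ5/bioinformatics | Finding Hidden Messages in DNA/02_Skew.py | skew
-- ===== SOURCE A (Python) =====
-- def skew(genome):
--     skew = [0]
--     for i in range(len(genome)):
--         if genome[i] == "C":
--             skew.append(skew[i] - 1)
--         elif genome[i] == "G":
--             skew.append(skew[i] + 1)
--         else:
--             skew.append(skew[i])
--     return skew
-- ===== SOURCE B (Python) =====
-- def skew(genome):
--     inc = {"G": 1, "C": -1}
--     total = sum(inc.get(ch, 0) for ch in genome)
--     out = [total]
--     for ch in reversed(genome):
--         total -= inc.get(ch, 0)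
--         out.append(total)
--     out.reverse()
--     return out
-- ===== Notes on version B (the rewrite author's own statement) =====
-- stated objective: alternative
-- what changed: Instead of building the skew array front-to-back by appending to a growing list, B first computes the final skew value as the total G-minus-C count, then walks the genome in reverse subtracting each increment to construct the array back-to-front, and reverses the result.
import Mathlib
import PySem

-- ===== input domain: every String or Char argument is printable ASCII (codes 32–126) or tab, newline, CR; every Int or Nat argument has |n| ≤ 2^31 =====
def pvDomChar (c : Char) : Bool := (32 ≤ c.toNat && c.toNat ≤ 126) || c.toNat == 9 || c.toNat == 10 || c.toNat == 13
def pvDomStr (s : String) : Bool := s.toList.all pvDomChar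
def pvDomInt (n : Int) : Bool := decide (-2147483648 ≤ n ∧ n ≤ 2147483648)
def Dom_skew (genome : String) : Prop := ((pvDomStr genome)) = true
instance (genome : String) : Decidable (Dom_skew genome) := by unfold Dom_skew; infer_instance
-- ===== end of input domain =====

-- B builds the skew array back-to-front: it first computes the total G-minus-C count, then walks the genome in reverse subtracting increments, and reverses; objective: alternative, same cost.


-- ===== PORT A =====
-- one loop step of A: the 'else => sk' branch of the match is unreachable (i is always in range)
def skewStep (genome : String) (sk : List Int) (i : Int) : List Int :=
  match PySem.Str.pyGet? genome i with
  | some c =>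
    if c = 'C' then sk ++ [(PySem.List.pyGet? sk i).getD 0 - 1]
    else if c = 'G' then sk ++ [(PySem.List.pyGet? sk i).getD 0 + 1]
    else sk ++ [(PySem.List.pyGet? sk i).getD 0]
  | none => sk

def skew (genome : String) : List Int :=
  (PySem.List.pyRange 0 (PySem.Str.len genome) 1).foldl (skewStep genome) [0]

-- ===== PORT B =====
-- the dict inc = {"G": 1, "C": -1}
def skewIncDict : PySem.Dict Char Int := PySem.Dict.ofList [('G', 1), ('C', -1)]

-- total = sum(inc.get(ch, 0) for ch in genome); then the reversed loop appending total after
-- each subtraction; then out.reverse()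
def skew_alt (genome : String) : List Int :=
  let total : Int := (genome.toList.map (fun ch => skewIncDict.getD ch 0)).sum
  let fin : Int × List Int :=
    genome.toList.reverse.foldl
      (fun st ch =>
        let t := st.1 - skewIncDict.getD ch 0
        (t, st.2 ++ [t]))
      (total, [total])
  fin.2.reverse

-- ===== PRECONDITION & SPEC =====
def Spec_skew (genome : String) (out : List Int) : Prop := out = skew_alt genome
instance (genome : String) (out : List Int) : Decidable (Spec_skew genome out) := by unfold Spec_skew; infer_instance

-- ===== CLAIM (what is proved, stated in full; the proofs are below) =====
def Claim_equal_skew : Prop := ∀ (genome : String), Dom_skew genome → Spec_skew genome (skew genome)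

-- ===== LEMMAS AND PROOFS =====

-- the increment function both ports compute, as a plain conditional
def skewInc (c : Char) : Int := if c = 'G' then 1 else if c = 'C' then -1 else 0

theorem skewIncDict_getD (c : Char) : skewIncDict.getD c 0 = skewInc c := by
  by_cases hG : c = 'G'
  · subst hG; decide
  · by_cases hC : c = 'C'
    · subst hC; decide
    · simp [skewIncDict, skewInc, hG, hC, PySem.Dict.ofList, PySem.Dict.update,
        PySem.Dict.getD_insert, PySem.Dict.getD_empty]

-- A's loop over the first n indices builds exactly the prefix sums of the increments
theorem skew_loop_eq (s : String) (n : Nat) (hn : n ≤ s.toList.length) :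
    (PySem.List.pyRange 0 (n : Int) 1).foldl (skewStep s) [0]
      = (List.range (n + 1)).map (fun k => ((s.toList.take k).map skewInc).sum) := by
  induction n with
  | zero => simp [PySem.List.pyRange]
  | succ n ih =>
      have hn' : n < s.toList.length := hn
      have h1 : ((n + 1 : Nat) : Int) = (n : Int) + 1 := by push_cast; ring
      rw [h1, PySem.List.pyRange_one_succ_right (by positivity), List.foldl_append,
        ih (le_of_lt hn'), List.foldl_cons, List.foldl_nil]
      have hget : PySem.Str.pyGet? s (n : Int) = some s.toList[n] := by
        simp [PySem.Str.pyGet?, List.getElem?_eq_getElem hn']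
      have hsk : PySem.List.pyGet?
          ((List.range (n + 1)).map (fun k => ((s.toList.take k).map skewInc).sum)) (n : Int)
          = some ((s.toList.take n).map skewInc).sum := by
        simp
      have htake : s.toList.take (n + 1) = s.toList.take n ++ [s.toList[n]] := by
        rw [List.take_add_one]; simp [List.getElem?_eq_getElem hn']
      have hstep : ((s.toList.take (n + 1)).map skewInc).sum
          = ((s.toList.take n).map skewInc).sum + skewInc s.toList[n] := by
        simp only [htake, List.map_append, List.sum_append, List.map_cons, List.map_nil, List.sum_cons, List.sum_nil]; ring
      rw [List.range_succ (n := n + 1), List.map_append]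
      unfold skewStep
      rw [hget]
      dsimp only
      by_cases hC : s.toList[n] = 'C'
      · have hi : skewInc s.toList[n] = -1 := by simp [skewInc, hC]
        rw [if_pos hC, hsk]
        congr 1
        simp only [List.map_cons, List.map_nil, Option.getD_some]
        rw [hstep, hi]; ring_nf
      · by_cases hG : s.toList[n] = 'G'
        · have hi : skewInc s.toList[n] = 1 := by simp [skewInc, hG]
          rw [if_neg hC, if_pos hG, hsk]
          congr 1
          simp only [List.map_cons, List.map_nil, Option.getD_some]
          rw [hstep, hi]
        · have hi : skewInc s.toList[n] = 0 := by simp [skewInc, hC, hG]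
          rw [if_neg hC, if_neg hG, hsk]
          congr 1
          simp only [List.map_cons, List.map_nil, Option.getD_some]
          rw [hstep, hi]; ring_nf

-- B's backward fold appends the running differences, one per processed character
theorem skew_fold_eq (l : List Char) (t : Int) (o : List Int) :
    (l.foldl (fun st ch =>
        let t' := st.1 - skewIncDict.getD ch 0
        (t', st.2 ++ [t'])) (t, o))
      = (t - ((l.map skewInc).sum),
         o ++ (List.range l.length).map (fun k => t - ((l.take (k + 1)).map skewInc).sum)) := by
  induction l generalizing t o with
  | nil => simp
  | cons a l ih =>
      rw [List.foldl_cons]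
      dsimp only
      rw [skewIncDict_getD, ih]
      simp only [Prod.mk.injEq]
      constructor
      · simp; ring
      · simp only [List.length_cons]
        rw [List.range_succ_eq_map]
        simp only [List.map_cons, List.map_map, Function.comp_def, List.take_succ_cons,
          List.sum_cons, List.append_assoc, List.cons_append, List.nil_append]
        congr 1
        simp
        intro k _
        ring

-- sum of increments over the first j characters of the reversal
theorem rev_take_sum (l : List Char) (j : Nat) :
    ((l.reverse.take j).map skewInc).sum
      = (l.map skewInc).sum - ((l.take (l.length - j)).map skewInc).sum := by
  rw [List.take_reverse, List.map_reverse, List.sum_reverse]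
  have h : (l.map skewInc).sum
      = ((l.take (l.length - j)).map skewInc).sum + ((l.drop (l.length - j)).map skewInc).sum := by
    conv_lhs => rw [← List.take_append_drop (l.length - j) l]
    simp
  omega

-- reversing a descending-index map over range gives the ascending map
theorem revmap_range (P : Nat → Int) (n : Nat) :
    ((List.range (n + 1)).map (fun k => P (n - k))).reverse = (List.range (n + 1)).map P := by
  apply List.ext_getElem
  · simp
  · intro i h1 h2
    simp only [List.length_reverse, List.length_map, List.length_range] at h1 h2
    rw [List.getElem_reverse]
    simp only [List.getElem_map, List.getElem_range, List.length_map, List.length_range]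
    congr 1
    omega

-- ===== VERDICT (by name: the statement is the Claim_ definition above) =====
theorem skew_spec : Claim_equal_skew := by
  intro genome _
  unfold Spec_skew skew skew_alt
  have hlen : PySem.Str.len genome = ((genome.toList.length : Nat) : Int) := by
    simp [PySem.Str.len_eq]
  set l := genome.toList with hl
  set n := l.length with hn
  set P : Nat → Int := fun k => ((l.take k).map skewInc).sum with hP
  rw [hlen, skew_loop_eq genome n le_rfl]
  -- B side
  have htot : (l.map (fun ch => skewIncDict.getD ch 0)).sum = (l.map skewInc).sum := by
    congr 1; exact List.map_congr_left (fun c _ => skewIncDict_getD c)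
  dsimp only
  rw [htot, skew_fold_eq]
  dsimp only
  -- rewrite each element of the backward list as a prefix sum
  have hmap : (List.range l.reverse.length).map
        (fun k => (l.map skewInc).sum - ((l.reverse.take (k + 1)).map skewInc).sum)
      = (List.range n).map (fun k => P (n - (k + 1))) := by
    rw [List.length_reverse]
    apply List.map_congr_left
    intro k hk
    rw [List.mem_range] at hk
    rw [rev_take_sum l (k + 1)]
    simp only [hP]
    ring
  rw [hmap]
  have hhead : (l.map skewInc).sum = P n := by
    simp only [hP, hn, List.take_length]
  have hlist : ([(l.map skewInc).sum] ++ (List.range n).map (fun k => P (n - (k + 1))))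
      = (List.range (n + 1)).map (fun k => P (n - k)) := by
    rw [List.range_succ_eq_map, List.map_cons, List.map_map]
    simp only [Function.comp_def, Nat.sub_zero, List.singleton_append, hhead]
  rw [hlist, revmap_range]
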